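-- pv_equiv track=rewrite | github.com/naveenvino/breezepython_lates | database_migration/schema_converter.py | convert_default_value
-- ===== SOURCE A (Python) =====
-- def convert_default_value(default_val: str) -> str:
--     """Convert SQL Server default values to PostgreSQL"""
--     if not default_val:
--         return ''
--
--     # Common conversions
--     replacements = {
--         'GETDATE()': 'CURRENT_TIMESTAMP',
--         'GETUTCDATE()': 'CURRENT_TIMESTAMP AT TIME ZONE \'UTC\'',
--         'NEWID()': 'gen_random_uuid()',
--         'SYSDATETIME()': 'CURRENT_TIMESTAMP',
--         'SYSUTCDATETIME()': 'CURRENT_TIMESTAMP AT TIME ZONE \'UTC\'',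
--     }
--
--     for old, new in replacements.items():
--         default_val = default_val.replace(old, new)
--
--     return default_val
-- ===== SOURCE B (Python) =====
-- import re
--
-- _REPLACEMENTS = {
--     'GETDATE()': 'CURRENT_TIMESTAMP',
--     'GETUTCDATE()': 'CURRENT_TIMESTAMP AT TIME ZONE \'UTC\'',
--     'NEWID()': 'gen_random_uuid()',
--     'SYSDATETIME()': 'CURRENT_TIMESTAMP',
--     'SYSUTCDATETIME()': 'CURRENT_TIMESTAMP AT TIME ZONE \'UTC\'',
-- }
--
-- _PATTERN = re.compile('|'.join(re.escape(k) for k in _REPLACEMENTS))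
--
--
-- def convert_default_value(default_val: str) -> str:
--     """Convert SQL Server default values to PostgreSQL (single-pass regex)."""
--     if not default_val:
--         return ''
--     return _PATTERN.sub(lambda m: _REPLACEMENTS[m.group(0)], default_val)
-- ===== Notes on version B (the rewrite author's own statement) =====
-- stated objective: idiomatic
-- what changed: Replaces five sequential full-string .replace passes by one compiled regex alternation: a single left-to-right scan that substitutes each key via a table lookup in a replacement function.
import Mathlib
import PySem

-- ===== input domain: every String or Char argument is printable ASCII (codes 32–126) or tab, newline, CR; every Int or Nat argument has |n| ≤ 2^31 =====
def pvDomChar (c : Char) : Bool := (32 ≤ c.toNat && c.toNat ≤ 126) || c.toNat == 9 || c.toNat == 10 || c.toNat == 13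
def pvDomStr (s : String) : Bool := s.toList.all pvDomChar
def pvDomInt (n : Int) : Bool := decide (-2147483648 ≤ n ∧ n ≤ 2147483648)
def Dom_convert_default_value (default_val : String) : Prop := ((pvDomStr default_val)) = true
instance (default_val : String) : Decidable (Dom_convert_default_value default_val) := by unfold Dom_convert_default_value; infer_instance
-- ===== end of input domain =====

-- B replaces A's five sequential full-string `.replace` passes by one left-to-right
-- scan (a compiled regex alternation with a table lookup in Python); objective: idiomatic.

-- ===== PORT A =====
-- the dict of A, as an association list in insertion order
def pvReplacementsA : List (String × String) :=
  [("GETDATE()", "CURRENT_TIMESTAMP"),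
   ("GETUTCDATE()", "CURRENT_TIMESTAMP AT TIME ZONE 'UTC'"),
   ("NEWID()", "gen_random_uuid()"),
   ("SYSDATETIME()", "CURRENT_TIMESTAMP"),
   ("SYSUTCDATETIME()", "CURRENT_TIMESTAMP AT TIME ZONE 'UTC'")]

def convert_default_value (default_val : String) : String :=
  -- `if not default_val: return ''` — a str is falsy exactly when empty
  if default_val.toList = [] then ""
  else pvReplacementsA.foldl (fun acc kv => PySem.Str.replace acc kv.1 kv.2) default_val

-- ===== PORT B =====
-- B's table: the same five mappings, as (key, replacement) char lists (the regex alternation order)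
def pvTableB : List (List Char × List Char) :=
  [("GETDATE()".toList, "CURRENT_TIMESTAMP".toList),
   ("GETUTCDATE()".toList, "CURRENT_TIMESTAMP AT TIME ZONE 'UTC'".toList),
   ("NEWID()".toList, "gen_random_uuid()".toList),
   ("SYSDATETIME()".toList, "CURRENT_TIMESTAMP".toList),
   ("SYSUTCDATETIME()".toList, "CURRENT_TIMESTAMP AT TIME ZONE 'UTC'".toList)]

-- hand port of `pattern.sub(lambda m: replacements[m.group(0)], s)` for a literal alternation:
-- one left-to-right scan; at each position the first alternative that matches is replaced
-- (exact for these alternatives: regex alternation tries them in order). Fuel = remaining length.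
def pvScanGo (T : List (List Char × List Char)) : Nat → List Char → List Char
  | _, [] => []
  | 0, l => l
  | fuel+1, c :: t =>
    match T.find? (fun kv => kv.1.isPrefixOf (c :: t)) with
    | some kv => kv.2 ++ pvScanGo T fuel ((c :: t).drop kv.1.length)
    | none => c :: pvScanGo T fuel t

def pvScan (T : List (List Char × List Char)) (s : List Char) : List Char := pvScanGo T s.length s

def convert_default_value_alt (default_val : String) : String :=
  if default_val.toList = [] then ""
  else String.ofList (pvScan pvTableB default_val.toList)

-- ===== PRECONDITION & SPEC =====
def Spec_convert_default_value (default_val : String) (out : String) : Prop := out = convert_default_value_alt default_val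
instance (default_val : String) (out : String) : Decidable (Spec_convert_default_value default_val out) := by unfold Spec_convert_default_value; infer_instance

-- ===== CLAIM (what is proved, stated in full; the proofs are below) =====
def Claim_equal_convert_default_value : Prop := ∀ (default_val : String), Dom_convert_default_value default_val → Spec_convert_default_value default_val (convert_default_value default_val)

-- ===== LEMMAS AND PROOFS =====

-- ---- generic list facts ----
theorem pv_prefix_append_cases {k x y : List Char} (h : k <+: x ++ y) : k <+: x ∨ x <+: k := by
  rcases le_or_gt k.length x.length with hl | hl
  · exact Or.inl ((List.isPrefix_append_of_length hl).mp h)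
  · right
    have hx : x <+: x ++ y := List.prefix_append x y
    exact List.prefix_of_prefix_length_le hx h (le_of_lt hl)

theorem pv_find?_append_some {α : Type} (p : α → Bool) (l₁ l₂ : List α) (kv : α)
    (h : l₁.find? p = some kv) : (l₁ ++ l₂).find? p = some kv := by
  induction l₁ with
  | nil => simp at h
  | cons a l ih =>
    simp only [List.cons_append, List.find?_cons] at *
    split at h <;> simp_all

theorem pv_find?_append_none {α : Type} (p : α → Bool) (l₁ l₂ : List α)
    (h : l₁.find? p = none) : (l₁ ++ l₂).find? p = l₂.find? p := by
  induction l₁ with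
  | nil => simp
  | cons a l ih =>
    simp only [List.cons_append, List.find?_cons] at *
    split at h
    · simp at h
    · exact ih h

-- ---- unfolding lemmas for PySem.Chars.replace (fuel-normalised) ----
theorem pv_repGo_fuel (old new : List Char) (ho : old ≠ []) :
    ∀ fuel l acc, l.length ≤ fuel →
      PySem.Chars.replace.go old new fuel l acc = acc.reverse ++ PySem.Chars.replace.go old new l.length l [] := by
  intro fuel
  induction fuel using Nat.strong_induction_on with
  | _ fuel ih =>
    intro l acc hl
    match l with
    | [] => cases fuel <;> simp [PySem.Chars.replace.go]
    | c :: t =>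
      match fuel with
      | 0 => simp at hl
      | n + 1 =>
        have h1 : 1 ≤ old.length := by
          cases old with
          | nil => exact absurd rfl ho
          | cons a b => simp
        have hts : t.length < n + 1 := by simp at hl; omega
        rw [show (c :: t).length = t.length + 1 from rfl]
        rw [PySem.Chars.replace.go, PySem.Chars.replace.go]
        by_cases hp : old.isPrefixOf (c :: t) = true
        · simp only [hp, if_true]
          have hdl : ((c :: t).drop old.length).length ≤ t.length := by
            simp only [List.length_drop, List.length_cons]; omega
          rw [ih n (Nat.lt_succ_self n) _ _ (by omega), ih t.length hts _ _ hdl]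
          simp
        · simp only [hp, if_false, Bool.false_eq_true]
          rw [ih n (Nat.lt_succ_self n) t (c :: acc) (by omega),
              ih t.length hts t [c] (le_refl t.length)]
          simp

theorem pv_rep_eq_go (old new s : List Char) (ho : old ≠ []) :
    PySem.Chars.replace s old new = PySem.Chars.replace.go old new s.length s [] := by
  rw [PySem.Chars.replace]
  simp [List.isEmpty_iff, ho]

theorem pv_rep_nil (old new : List Char) (ho : old ≠ []) :
    PySem.Chars.replace [] old new = [] := by
  rw [pv_rep_eq_go _ _ _ ho]
  simp [PySem.Chars.replace.go]

theorem pv_rep_cons_none (old new : List Char) (ho : old ≠ []) (c : Char) (t : List Char)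
    (h : old.isPrefixOf (c :: t) = false) :
    PySem.Chars.replace (c :: t) old new = c :: PySem.Chars.replace t old new := by
  rw [pv_rep_eq_go _ _ _ ho, pv_rep_eq_go _ _ _ ho]
  rw [show (c :: t).length = t.length + 1 from rfl]
  rw [PySem.Chars.replace.go]
  simp only [h, if_false, Bool.false_eq_true]
  rw [pv_repGo_fuel _ _ ho _ _ _ (le_refl t.length)]
  simp

theorem pv_rep_cons_match (old new : List Char) (ho : old ≠ []) (c : Char) (t : List Char)
    (h : old.isPrefixOf (c :: t) = true) :
    PySem.Chars.replace (c :: t) old new = new ++ PySem.Chars.replace ((c :: t).drop old.length) old new := by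
  rw [pv_rep_eq_go _ _ _ ho, pv_rep_eq_go _ _ _ ho]
  rw [show (c :: t).length = t.length + 1 from rfl]
  rw [PySem.Chars.replace.go]
  simp only [h, if_true]
  have h1 : 1 ≤ old.length := by
    cases old with
    | nil => exact absurd rfl ho
    | cons a b => simp
  have hlen : ((c :: t).drop old.length).length ≤ t.length := by
    simp only [List.length_drop, List.length_cons]; omega
  rw [pv_repGo_fuel _ _ ho _ _ _ hlen]
  simp

-- ---- unfolding lemmas for pvScan ----
theorem pv_scanGo_fuel (T : List (List Char × List Char)) (hT : ∀ kv ∈ T, kv.1 ≠ []) :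
    ∀ fuel l, l.length ≤ fuel → pvScanGo T fuel l = pvScan T l := by
  intro fuel
  induction fuel using Nat.strong_induction_on with
  | _ fuel ih =>
    intro l hl
    match l with
    | [] => cases fuel <;> rfl
    | c :: t =>
      match fuel with
      | 0 => simp at hl
      | n + 1 =>
        have hts : t.length < n + 1 := by simp at hl; omega
        rw [pvScan, show (c :: t).length = t.length + 1 from rfl]
        rw [pvScanGo, pvScanGo]
        cases hf : T.find? (fun kv => kv.1.isPrefixOf (c :: t)) with
        | some kv =>
          simp only []
          have hkv : kv ∈ T := List.mem_of_find?_eq_some hf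
          have h1 : 1 ≤ kv.1.length := by
            have := hT kv hkv
            cases h : kv.1 with
            | nil => exact absurd h this
            | cons a b => simp
          have hdl : ((c :: t).drop kv.1.length).length ≤ t.length := by
            simp only [List.length_drop, List.length_cons]; omega
          rw [ih n (Nat.lt_succ_self n) _ (by omega), ih t.length hts _ hdl]
        | none =>
          simp only []
          rw [ih n (Nat.lt_succ_self n) t (by omega), ih t.length hts t (le_refl t.length)]

theorem pv_scan_cons_match (T : List (List Char × List Char)) (hT : ∀ kv ∈ T, kv.1 ≠ [])
    (c : Char) (t : List Char) (kv : List Char × List Char)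
    (hf : T.find? (fun kv => kv.1.isPrefixOf (c :: t)) = some kv) :
    pvScan T (c :: t) = kv.2 ++ pvScan T ((c :: t).drop kv.1.length) := by
  have hkv : kv ∈ T := List.mem_of_find?_eq_some hf
  have h1 : 1 ≤ kv.1.length := by
    have := hT kv hkv
    cases h : kv.1 with
    | nil => exact absurd h this
    | cons a b => simp
  have hlen : ((c :: t).drop kv.1.length).length ≤ t.length := by
    simp only [List.length_drop, List.length_cons]; omega
  rw [pvScan, show (c :: t).length = t.length + 1 from rfl, pvScanGo, hf]
  show kv.2 ++ pvScanGo T t.length ((c :: t).drop kv.1.length) = _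
  rw [pv_scanGo_fuel T hT t.length _ hlen]

theorem pv_scan_cons_none (T : List (List Char × List Char)) (hT : ∀ kv ∈ T, kv.1 ≠ [])
    (c : Char) (t : List Char)
    (hf : T.find? (fun kv => kv.1.isPrefixOf (c :: t)) = none) :
    pvScan T (c :: t) = c :: pvScan T t := by
  rw [pvScan, show (c :: t).length = t.length + 1 from rfl, pvScanGo, hf]
  show c :: pvScanGo T t.length t = _
  rw [pv_scanGo_fuel T hT t.length t (le_refl t.length)]

-- ---- append pass-through lemmas ----
theorem pv_rep_append (old new : List Char) (ho : old ≠ []) :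
    ∀ x y, (∀ p < x.length, ¬ old <+: x.drop p ∧ ¬ x.drop p <+: old) →
      PySem.Chars.replace (x ++ y) old new = x ++ PySem.Chars.replace y old new := by
  intro x
  induction x with
  | nil => intro y _; simp
  | cons c x' ih =>
    intro y h
    have h0 := h 0 (by simp)
    simp only [List.drop_zero] at h0
    have hnp : old.isPrefixOf (c :: (x' ++ y)) = false := by
      rw [Bool.eq_false_iff]
      intro hc
      have hc' : old <+: (c :: x') ++ y := by
        simpa using List.isPrefixOf_iff_prefix.mp hc
      rcases pv_prefix_append_cases hc' with h1 | h1
      · exact h0.1 h1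
      · exact h0.2 h1
    have hrec : ∀ p < x'.length, ¬ old <+: x'.drop p ∧ ¬ x'.drop p <+: old := by
      intro p hp
      have := h (p + 1) (by simp; omega)
      simpa using this
    show PySem.Chars.replace (c :: (x' ++ y)) old new = _
    rw [pv_rep_cons_none _ _ ho _ _ hnp, ih y hrec]
    simp

theorem pv_scan_append (T : List (List Char × List Char)) (hT : ∀ kv ∈ T, kv.1 ≠ []) :
    ∀ x y, (∀ p < x.length, ∀ kv ∈ T, ¬ kv.1 <+: x.drop p ∧ ¬ x.drop p <+: kv.1) →
      pvScan T (x ++ y) = x ++ pvScan T y := by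
  intro x
  induction x with
  | nil => intro y _; simp
  | cons c x' ih =>
    intro y h
    have hf : T.find? (fun kv => kv.1.isPrefixOf (c :: (x' ++ y))) = none := by
      rw [List.find?_eq_none]
      intro kv hkv hc
      have h0 := h 0 (by simp) kv hkv
      simp only [List.drop_zero] at h0
      have hc' : kv.1 <+: (c :: x') ++ y := by
        simpa using List.isPrefixOf_iff_prefix.mp hc
      rcases pv_prefix_append_cases hc' with h1 | h1
      · exact h0.1 h1
      · exact h0.2 h1
    have hrec : ∀ p < x'.length, ∀ kv ∈ T, ¬ kv.1 <+: x'.drop p ∧ ¬ x'.drop p <+: kv.1 := by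
      intro p hp kv hkv
      have := h (p + 1) (by simp; omega) kv hkv
      simpa using this
    show pvScan T (c :: (x' ++ y)) = _
    rw [pv_scan_cons_none T hT _ _ hf, ih y hrec]
    simp

-- ---- the scan never creates an occurrence of a word that overlaps no replacement value ----
theorem pv_scan_no_prefix (T : List (List Char × List Char)) (hT : ∀ kv ∈ T, kv.1 ≠ []) :
    ∀ n s, s.length ≤ n → ∀ w : List Char, w ≠ [] →
      (∀ p < w.length, ∀ kv ∈ T, ¬ w.drop p <+: kv.2 ∧ ¬ kv.2 <+: w.drop p) →
      ¬ w <+: s → ¬ w <+: pvScan T s := by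
  intro n
  induction n with
  | zero =>
    intro s hs w hw _ hws
    have : s = [] := List.eq_nil_of_length_eq_zero (Nat.le_zero.mp hs)
    subst this
    simpa [pvScan, pvScanGo]
  | succ n ih =>
    intro s hs w hw ha hws
    match s with
    | [] => simpa [pvScan, pvScanGo]
    | c :: t =>
      cases hf : T.find? (fun kv => kv.1.isPrefixOf (c :: t)) with
      | some kv =>
        rw [pv_scan_cons_match T hT _ _ _ hf]
        intro hc
        have hkv : kv ∈ T := List.mem_of_find?_eq_some hf
        have hwpos : 0 < w.length := List.length_pos_iff.mpr hw
        have h0 := ha 0 hwpos kv hkv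
        simp only [List.drop_zero] at h0
        rcases pv_prefix_append_cases hc with h1 | h1
        · exact h0.1 h1
        · exact h0.2 h1
      | none =>
        rw [pv_scan_cons_none T hT _ _ hf]
        intro hc
        match w, hw with
        | w0 :: w', _ =>
          rcases List.cons_prefix_cons.mp hc with ⟨hw0, hw'⟩
          subst hw0
          match w' with
          | [] =>
            exact hws (List.cons_prefix_cons.mpr ⟨rfl, List.nil_prefix⟩)
          | d :: w'' =>
            have hwt : ¬ (d :: w'') <+: t := by
              intro hq
              exact hws (List.cons_prefix_cons.mpr ⟨rfl, hq⟩)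
            have ha' : ∀ p < (d :: w'').length, ∀ kv ∈ T, ¬ (d :: w'').drop p <+: kv.2 ∧ ¬ kv.2 <+: (d :: w'').drop p := by
              intro p hp kv hkv
              have := ha (p + 1) (by simp at hp ⊢; omega) kv hkv
              simpa using this
            exact ih t (by simp at hs; omega) (d :: w'') (by simp) ha' hwt hw'

-- ---- the key step: one more sequential replace = scanning with the table extended by one entry ----
theorem pv_step (T : List (List Char × List Char)) (k v : List Char) (hk : k ≠ [])
    (hT : ∀ kv ∈ T, kv.1 ≠ [])
    (ha : ∀ p < k.length, ∀ kv ∈ T, ¬ k.drop p <+: kv.2 ∧ ¬ kv.2 <+: k.drop p)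
    (hb : ∀ kv ∈ T, ∀ p < kv.2.length, ¬ k <+: kv.2.drop p ∧ ¬ kv.2.drop p <+: k)
    (hc : ∀ kv ∈ T, ∀ p < k.length, ¬ kv.1 <+: k.drop p ∧ ¬ k.drop p <+: kv.1) :
    ∀ n s, s.length ≤ n →
      PySem.Chars.replace (pvScan T s) k v = pvScan (T ++ [(k, v)]) s := by
  have hT' : ∀ kv ∈ T ++ [(k, v)], kv.1 ≠ [] := by
    intro kv hkv
    rcases List.mem_append.mp hkv with h | h
    · exact hT kv h
    · simp at h; subst h; exact hk
  intro n
  induction n with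
  | zero =>
    intro s hs
    have : s = [] := List.eq_nil_of_length_eq_zero (Nat.le_zero.mp hs)
    subst this
    simp [pvScan, pvScanGo, pv_rep_nil _ _ hk]
  | succ n ih =>
    intro s hs
    match s with
    | [] => simp [pvScan, pvScanGo, pv_rep_nil _ _ hk]
    | c :: t =>
      cases hf : T.find? (fun kv => kv.1.isPrefixOf (c :: t)) with
      | some kv =>
        have hkv : kv ∈ T := List.mem_of_find?_eq_some hf
        have hfull : (T ++ [(k, v)]).find? (fun kv => kv.1.isPrefixOf (c :: t)) = some kv :=
          pv_find?_append_some _ _ _ _ hf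
        rw [pv_scan_cons_match T hT _ _ _ hf, pv_scan_cons_match _ hT' _ _ _ hfull]
        have hrest : ((c :: t).drop kv.1.length).length ≤ n := by
          have h1 : 1 ≤ kv.1.length := by
            have := hT kv hkv
            cases h : kv.1 with
            | nil => exact absurd h this
            | cons a b => simp
          simp only [List.length_drop, List.length_cons] at *
          omega
        rw [pv_rep_append k v hk kv.2 _ (hb kv hkv), ih _ hrest]
      | none =>
        by_cases hp : k.isPrefixOf (c :: t) = true
        · -- k matches at the head, no entry of T does
          have hpre : k <+: (c :: t) := List.isPrefixOf_iff_prefix.mp hp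
          obtain ⟨rest, hrest⟩ := hpre
          have hfull : (T ++ [(k, v)]).find? (fun kv => kv.1.isPrefixOf (c :: t)) = some (k, v) := by
            rw [pv_find?_append_none _ _ _ hf]
            simp [hp]
          rw [pv_scan_cons_match _ hT' _ _ (k, v) hfull]
          have hscan : pvScan T (c :: t) = k ++ pvScan T rest := by
            rw [← hrest]
            exact pv_scan_append T hT k rest (fun p hp kv hkv => hc kv hkv p hp)
          rw [hscan]
          have hdrop : (c :: t).drop k.length = rest := by
            rw [← hrest]; simp
          rw [hdrop]
          have hrep : PySem.Chars.replace (k ++ pvScan T rest) k v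
              = v ++ PySem.Chars.replace (pvScan T rest) k v := by
            match k, hk with
            | k0 :: k', _ =>
              have hpk : (k0 :: k').isPrefixOf (k0 :: (k' ++ pvScan T rest)) = true :=
                List.isPrefixOf_iff_prefix.mpr (List.cons_prefix_cons.mpr ⟨rfl, List.prefix_append k' _⟩)
              show PySem.Chars.replace (k0 :: (k' ++ pvScan T rest)) (k0 :: k') v = _
              rw [pv_rep_cons_match (k0 :: k') v (by simp) k0 (k' ++ pvScan T rest) hpk]
              congr 1
              simp
          rw [hrep, ih rest ?_]
          have h1 : 1 ≤ k.length := by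
            cases k with
            | nil => exact absurd rfl hk
            | cons a b => simp
          have : rest.length + k.length = t.length + 1 := by
            have := congrArg List.length hrest
            simp at this
            omega
          simp only [List.length_cons] at hs
          omega
        · -- no match at all at the head
          have hfull : (T ++ [(k, v)]).find? (fun kv => kv.1.isPrefixOf (c :: t)) = none := by
            rw [pv_find?_append_none _ _ _ hf]
            simp [Bool.eq_false_iff.mpr (fun hc' => hp hc')]
          rw [pv_scan_cons_none T hT _ _ hf, pv_scan_cons_none _ hT' _ _ hfull]
          have hnp : k.isPrefixOf (c :: pvScan T t) = false := by
            rw [Bool.eq_false_iff]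
            intro hc'
            have hnos : ¬ k <+: (c :: t) := fun hq => hp (List.isPrefixOf_iff_prefix.mpr hq)
            have := pv_scan_no_prefix T hT (t.length + 1) (c :: t) (by simp) k hk ha hnos
            rw [pv_scan_cons_none T hT _ _ hf] at this
            exact this (List.isPrefixOf_iff_prefix.mp hc')
          rw [pv_rep_cons_none _ _ hk _ _ hnp, ih t (by simp at hs; omega)]

theorem pv_scan_empty_table : ∀ n s, s.length ≤ n → pvScan ([] : List (List Char × List Char)) s = s := by
  intro n
  induction n with
  | zero =>
    intro s hs
    have : s = [] := List.eq_nil_of_length_eq_zero (Nat.le_zero.mp hs)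
    subst this; rfl
  | succ n ih =>
    intro s hs
    match s with
    | [] => rfl
    | c :: t =>
      rw [pv_scan_cons_none [] (by simp) c t (by simp)]
      rw [ih t (by simp at hs; omega)]

theorem pv_chain (l : List Char) :
    PySem.Chars.replace (PySem.Chars.replace (PySem.Chars.replace (PySem.Chars.replace (PySem.Chars.replace (l) "GETDATE()".toList "CURRENT_TIMESTAMP".toList) "GETUTCDATE()".toList "CURRENT_TIMESTAMP AT TIME ZONE 'UTC'".toList) "NEWID()".toList "gen_random_uuid()".toList) "SYSDATETIME()".toList "CURRENT_TIMESTAMP".toList) "SYSUTCDATETIME()".toList "CURRENT_TIMESTAMP AT TIME ZONE 'UTC'".toList = pvScan pvTableB l := by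
  have h1 : PySem.Chars.replace l "GETDATE()".toList "CURRENT_TIMESTAMP".toList = pvScan [("GETDATE()".toList, "CURRENT_TIMESTAMP".toList)] l := by
    have hstep := pv_step [] "GETDATE()".toList "CURRENT_TIMESTAMP".toList (by decide) (by decide) (by decide) (by decide) (by decide) l.length l le_rfl
    rw [pv_scan_empty_table l.length l le_rfl] at hstep
    simpa using hstep
  have h2 : PySem.Chars.replace (pvScan [("GETDATE()".toList, "CURRENT_TIMESTAMP".toList)] l) "GETUTCDATE()".toList "CURRENT_TIMESTAMP AT TIME ZONE 'UTC'".toList = pvScan [("GETDATE()".toList, "CURRENT_TIMESTAMP".toList), ("GETUTCDATE()".toList, "CURRENT_TIMESTAMP AT TIME ZONE 'UTC'".toList)] l := by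
    simpa using pv_step [("GETDATE()".toList, "CURRENT_TIMESTAMP".toList)] "GETUTCDATE()".toList "CURRENT_TIMESTAMP AT TIME ZONE 'UTC'".toList (by decide) (by decide) (by decide) (by decide) (by decide) l.length l le_rfl
  have h3 : PySem.Chars.replace (pvScan [("GETDATE()".toList, "CURRENT_TIMESTAMP".toList), ("GETUTCDATE()".toList, "CURRENT_TIMESTAMP AT TIME ZONE 'UTC'".toList)] l) "NEWID()".toList "gen_random_uuid()".toList = pvScan [("GETDATE()".toList, "CURRENT_TIMESTAMP".toList), ("GETUTCDATE()".toList, "CURRENT_TIMESTAMP AT TIME ZONE 'UTC'".toList), ("NEWID()".toList, "gen_random_uuid()".toList)] l := by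
    simpa using pv_step [("GETDATE()".toList, "CURRENT_TIMESTAMP".toList), ("GETUTCDATE()".toList, "CURRENT_TIMESTAMP AT TIME ZONE 'UTC'".toList)] "NEWID()".toList "gen_random_uuid()".toList (by decide) (by decide) (by decide) (by decide) (by decide) l.length l le_rfl
  have h4 : PySem.Chars.replace (pvScan [("GETDATE()".toList, "CURRENT_TIMESTAMP".toList), ("GETUTCDATE()".toList, "CURRENT_TIMESTAMP AT TIME ZONE 'UTC'".toList), ("NEWID()".toList, "gen_random_uuid()".toList)] l) "SYSDATETIME()".toList "CURRENT_TIMESTAMP".toList = pvScan [("GETDATE()".toList, "CURRENT_TIMESTAMP".toList), ("GETUTCDATE()".toList, "CURRENT_TIMESTAMP AT TIME ZONE 'UTC'".toList), ("NEWID()".toList, "gen_random_uuid()".toList), ("SYSDATETIME()".toList, "CURRENT_TIMESTAMP".toList)] l := by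
    simpa using pv_step [("GETDATE()".toList, "CURRENT_TIMESTAMP".toList), ("GETUTCDATE()".toList, "CURRENT_TIMESTAMP AT TIME ZONE 'UTC'".toList), ("NEWID()".toList, "gen_random_uuid()".toList)] "SYSDATETIME()".toList "CURRENT_TIMESTAMP".toList (by decide) (by decide) (by decide) (by decide) (by decide) l.length l le_rfl
  have h5 : PySem.Chars.replace (pvScan [("GETDATE()".toList, "CURRENT_TIMESTAMP".toList), ("GETUTCDATE()".toList, "CURRENT_TIMESTAMP AT TIME ZONE 'UTC'".toList), ("NEWID()".toList, "gen_random_uuid()".toList), ("SYSDATETIME()".toList, "CURRENT_TIMESTAMP".toList)] l) "SYSUTCDATETIME()".toList "CURRENT_TIMESTAMP AT TIME ZONE 'UTC'".toList = pvScan [("GETDATE()".toList, "CURRENT_TIMESTAMP".toList), ("GETUTCDATE()".toList, "CURRENT_TIMESTAMP AT TIME ZONE 'UTC'".toList), ("NEWID()".toList, "gen_random_uuid()".toList), ("SYSDATETIME()".toList, "CURRENT_TIMESTAMP".toList), ("SYSUTCDATETIME()".toList, "CURRENT_TIMESTAMP AT TIME ZONE 'UTC'".toList)] l := by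
    simpa using pv_step [("GETDATE()".toList, "CURRENT_TIMESTAMP".toList), ("GETUTCDATE()".toList, "CURRENT_TIMESTAMP AT TIME ZONE 'UTC'".toList), ("NEWID()".toList, "gen_random_uuid()".toList), ("SYSDATETIME()".toList, "CURRENT_TIMESTAMP".toList)] "SYSUTCDATETIME()".toList "CURRENT_TIMESTAMP AT TIME ZONE 'UTC'".toList (by decide) (by decide) (by decide) (by decide) (by decide) l.length l le_rfl
  rw [h1, h2, h3, h4, h5]
  rfl

-- ===== VERDICT (by name: the statement is the Claim_ definition above) =====
theorem convert_default_value_spec : Claim_equal_convert_default_value := by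
  intro s _
  unfold Spec_convert_default_value convert_default_value convert_default_value_alt
  by_cases h : s.toList = []
  · simp [h]
  · simp only [h, if_false]
    apply String.toList_inj.mp
    rw [String.toList_ofList]
    simp only [pvReplacementsA, List.foldl, PySem.Str.toList_replace]
    exact pv_chain s.toList
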